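-- pv_equiv track=rewrite | github.com/dimeks777/python-labs | src/lab3/main.py | check_left_and_right
-- ===== SOURCE A (Python) =====
-- def check_left_and_right(matrix, i, j):
--     result = True
--     for k in range(0, len(matrix[i])):
--         if k != j:
--             if k < j:
--                 if matrix[i][k] >= matrix[i][j]:
--                     result = False
--             elif k > j:
--                 if matrix[i][k] <= matrix[i][j]:
--                     result = False
--     return result
-- ===== SOURCE B (Python) =====
-- def check_left_and_right(matrix, i, j):
--     row = matrix[i]
--     pivot = row[j]
--
--     def ok(lo, hi):
--         if hi - lo == 0:
--             return True
--         if hi - lo == 1: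
--             if lo == j:
--                 return True
--             if lo < j:
--                 return row[lo] < pivot
--             return row[lo] > pivot
--         mid = (lo + hi) // 2
--         return ok(lo, mid) and ok(mid, hi)
--
--     return ok(0, len(row))
-- ===== Notes on version B (the rewrite author's own statement) =====
-- stated objective: alternative
-- what changed: B replaces A's linear index loop with a divide-and-conquer recursion that splits the index interval in half and conjoins the two halves, deciding each single cell against the pivot at the leaves.
-- outside the precondition, e.g. on check_left_and_right([[]], 0, 3): A returns True, B raises IndexError
import Mathlib
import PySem

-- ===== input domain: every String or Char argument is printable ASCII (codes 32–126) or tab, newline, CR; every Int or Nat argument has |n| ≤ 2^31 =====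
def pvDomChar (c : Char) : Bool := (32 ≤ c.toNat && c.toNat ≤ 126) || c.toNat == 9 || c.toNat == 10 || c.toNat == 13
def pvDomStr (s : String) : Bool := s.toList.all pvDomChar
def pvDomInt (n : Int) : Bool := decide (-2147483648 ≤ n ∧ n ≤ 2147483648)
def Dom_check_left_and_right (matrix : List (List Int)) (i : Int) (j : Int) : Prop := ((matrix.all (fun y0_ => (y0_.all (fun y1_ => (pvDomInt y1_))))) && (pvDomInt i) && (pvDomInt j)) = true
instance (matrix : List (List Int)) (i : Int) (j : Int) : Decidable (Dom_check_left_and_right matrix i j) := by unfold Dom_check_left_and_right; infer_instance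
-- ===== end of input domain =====

-- B replaces A's linear index loop by a divide-and-conquer recursion over the index
-- interval: split at the midpoint, conjoin the halves, decide single cells at the leaves.

-- ===== PORT A =====
def check_left_and_right (matrix : List (List Int)) (i : Int) (j : Int) : Bool :=
  let row := (PySem.List.pyGet? matrix i).getD []
  (PySem.List.pyRange 0 (row.length : Int) 1).foldl
    (fun result k =>
      if k ≠ j then
        if k < j then
          (if PySem.List.pyGetD row k 0 ≥ PySem.List.pyGetD row j 0 then false else result)
        else if j < k then
          (if PySem.List.pyGetD row k 0 ≤ PySem.List.pyGetD row j 0 then false else result)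
        else result
      else result)
    true

-- ===== PORT B =====
-- checks the cells with indices in [lo, hi): empty/singleton base cases, else split at mid;
-- the extra fuel argument (≥ hi - lo at every call) only makes the recursion structural
def okAlt (row : List Int) (pivot j : Int) : Nat → Nat → Nat → Bool
  | 0, _, _ => true
  | fuel + 1, lo, hi =>
    if hi - lo = 0 then true
    else if hi - lo = 1 then
      if (lo : Int) = j then true
      else if (lo : Int) < j then decide (PySem.List.pyGetD row (lo : Int) 0 < pivot)
      else decide (pivot < PySem.List.pyGetD row (lo : Int) 0)
    else
      okAlt row pivot j fuel lo ((lo + hi) / 2) && okAlt row pivot j fuel ((lo + hi) / 2) hi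

def check_left_and_right_alt (matrix : List (List Int)) (i : Int) (j : Int) : Bool :=
  let row := (PySem.List.pyGet? matrix i).getD []
  let pivot := PySem.List.pyGetD row j 0
  okAlt row pivot j row.length 0 row.length

-- ===== PRECONDITION & SPEC =====
-- Pre_ excludes out-of-range i or j (there both Pythons raise IndexError) and empty rows,
-- on which A vacuously returns True while B's row[j] raises IndexError.
def Pre_check_left_and_right (matrix : List (List Int)) (i : Int) (j : Int) : Prop :=
  PySem.Raise.InRange matrix.length i ∧
    ((PySem.List.pyGet? matrix i).getD []) ≠ [] ∧
    PySem.Raise.InRange ((PySem.List.pyGet? matrix i).getD []).length j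
instance (matrix : List (List Int)) (i : Int) (j : Int) : Decidable (Pre_check_left_and_right matrix i j) := by unfold Pre_check_left_and_right; infer_instance
def pvWitness_check_left_and_right : List (List Int) × Int × Int := ([[1, 3, 2, 5]], 0, 1)

def Spec_check_left_and_right (matrix : List (List Int)) (i : Int) (j : Int) (out : Bool) : Prop := out = check_left_and_right_alt matrix i j
instance (matrix : List (List Int)) (i : Int) (j : Int) (out : Bool) : Decidable (Spec_check_left_and_right matrix i j out) := by unfold Spec_check_left_and_right; infer_instance

-- ===== CLAIM (what is proved, stated in full; the proofs are below) =====
def Claim_equal_check_left_and_right : Prop := ∀ (matrix : List (List Int)) (i : Int) (j : Int), Dom_check_left_and_right matrix i j → Pre_check_left_and_right matrix i j → Spec_check_left_and_right matrix i j (check_left_and_right matrix i j)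

-- ===== LEMMAS AND PROOFS =====

-- A's violation test at index k (helper for the proofs only)
def violB (row : List Int) (pivot j k : Int) : Bool :=
  (decide (k < j) && decide (pivot ≤ PySem.List.pyGetD row k 0)) ||
  (decide (j < k) && decide (PySem.List.pyGetD row k 0 ≤ pivot))

-- B's leaf test at index k equals the negation of A's violation test
theorem leaf_eq_not_viol (row : List Int) (pivot j : Int) (k : Nat) :
    (if (k : Int) = j then true
     else if (k : Int) < j then decide (PySem.List.pyGetD row (k : Int) 0 < pivot)
     else decide (pivot < PySem.List.pyGetD row (k : Int) 0))
    = !(violB row pivot j (k : Int)) := by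
  rw [Bool.eq_iff_iff]
  unfold violB
  rcases lt_trichotomy ((k : Int)) j with h | h | h
  · simp [h, h.ne, not_lt_of_gt h, not_le]
  · simp [h]
  · simp [h, h.ne', not_lt_of_gt h, not_le]

-- divide and conquer over [lo, hi) = conjunction of the leaf tests over range' lo (hi - lo)
theorem okAlt_eq_all (row : List Int) (pivot j : Int) :
    ∀ (fuel lo hi : Nat), hi - lo ≤ fuel →
      okAlt row pivot j fuel lo hi
        = (List.range' lo (hi - lo)).all (fun k => !(violB row pivot j (k : Int))) := by
  intro fuel
  induction fuel with
  | zero =>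
    intro lo hi h
    have h0 : hi - lo = 0 := by omega
    simp [okAlt, h0]
  | succ fuel ih =>
    intro lo hi h
    unfold okAlt
    by_cases h0 : hi - lo = 0
    · simp [h0]
    by_cases h1 : hi - lo = 1
    · rw [if_neg h0, if_pos h1, h1]
      rw [List.range'_one, List.all_cons, List.all_nil, Bool.and_true]
      exact leaf_eq_not_viol row pivot j lo
    · have hlo : lo < (lo + hi) / 2 := by omega
      have hhi : (lo + hi) / 2 < hi := by omega
      rw [if_neg h0, if_neg h1]
      rw [ih lo ((lo + hi) / 2) (by omega), ih ((lo + hi) / 2) hi (by omega)]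
      have hsplit : List.range' lo (hi - lo)
          = List.range' lo ((lo + hi) / 2 - lo) ++ List.range' ((lo + hi) / 2) (hi - (lo + hi) / 2) := by
        have := @List.range'_append lo ((lo + hi) / 2 - lo) (hi - (lo + hi) / 2) 1
        simp only [one_mul] at this
        rw [show lo + ((lo + hi) / 2 - lo) = (lo + hi) / 2 by omega] at this
        rw [show ((lo + hi) / 2 - lo) + (hi - (lo + hi) / 2) = hi - lo by omega] at this
        exact this.symm
      rw [hsplit, List.all_append]

-- A's flag-carrying fold = "no index in range violates"
theorem foldA_eq_not_any (row : List Int) (j : Int) :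
    ((PySem.List.pyRange 0 (row.length : Int) 1).foldl
      (fun result k =>
        if k ≠ j then
          if k < j then
            (if PySem.List.pyGetD row k 0 ≥ PySem.List.pyGetD row j 0 then false else result)
          else if j < k then
            (if PySem.List.pyGetD row k 0 ≤ PySem.List.pyGetD row j 0 then false else result)
          else result
        else result)
      true)
    = !((PySem.List.pyRange 0 (row.length : Int) 1).any
        (fun k => violB row (PySem.List.pyGetD row j 0) j k)) := by
  rw [PySem.List.foldl_congr_mem _ _
    (fun result k => if violB row (PySem.List.pyGetD row j 0) j k then false else result) true
    (by
      intro acc k _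
      unfold violB
      rcases lt_trichotomy k j with h | h | h
      · simp [h, h.ne, not_lt_of_gt h, ge_iff_le]
      · simp [h]
      · simp [h, h.ne', not_lt_of_gt h])]
  rw [PySem.List.foldl_if_false_eq, Bool.true_and]

-- the two index enumerations agree: any over pyRange 0 len ↔ not-all over range' 0 len
theorem not_any_eq_all (L : Nat) (v : Int → Bool) :
    (!((PySem.List.pyRange 0 (L : Int) 1).any v))
      = (List.range' 0 L).all (fun k => !(v (k : Int))) := by
  rw [Bool.eq_iff_iff]
  simp only [Bool.not_eq_true', List.any_eq_false, List.all_eq_true,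
    List.mem_range'_1, PySem.List.mem_pyRange_one]
  constructor
  · intro h k hk
    simpa using h (k : Int) ⟨by positivity, by simpa using (by exact_mod_cast hk.2 : (k : Int) < 0 + L)⟩
  · intro h k hk
    have h0 : 0 ≤ k := hk.1
    have : k = ((k.toNat : Nat) : Int) := by omega
    rw [this]
    simpa using h k.toNat ⟨by omega, by omega⟩

-- ===== VERDICT (by name: the statement is the Claim_ definition above) =====
theorem check_left_and_right_spec : Claim_equal_check_left_and_right := by
  intro matrix i j _ _
  unfold Spec_check_left_and_right check_left_and_right check_left_and_right_alt
  simp only []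
  rw [foldA_eq_not_any, not_any_eq_all,
      okAlt_eq_all _ _ _ _ 0 _ (by omega), Nat.sub_zero]
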